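-- pv_equiv track=rewrite | github.com/liyw0205/nonebot_plugin_xiuxian_2_pmv | nonebot_plugin_xiuxian_2/xiuxian/xiuxian_entertainment/mod/gomoku.py | _line_score
-- ===== SOURCE A (Python) =====
-- BOARD_SIZE = 15
--
-- def _line_score(board, x, y, stone):
--     def count_dir(dx, dy):
--         cnt = 0
--         tx, ty = x, y
--         while True:
--             tx += dx
--             ty += dy
--             if 0 <= tx < BOARD_SIZE and 0 <= ty < BOARD_SIZE and board[ty][tx] == stone:
--                 cnt += 1
--             else:
--                 break
--         return cnt
--
--     score = 0
--     for dx, dy in [(1,0), (0,1), (1,1), (1,-1)]: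
--         c = 1 + count_dir(dx,dy) + count_dir(-dx,-dy)
--         if c >= 5:
--             score += 100000
--         elif c == 4:
--             score += 5000
--         elif c == 3:
--             score += 500
--         elif c == 2:
--             score += 50
--         else:
--             score += 5
--     return score
-- ===== SOURCE B (Python) =====
-- BOARD_SIZE = 15
-- _SCORES = {1: 5, 2: 50, 3: 500, 4: 5000, 5: 100000}
--
-- def _line_score(board, x, y, stone):
--     total = 0
--     for dx, dy in ((1, 0), (0, 1), (1, 1), (1, -1)):
--         # gather the whole in-bounds line through (x, y) for this direction
--         before = []
--         tx, ty = x - dx, y - dy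
--         while 0 <= tx < BOARD_SIZE and 0 <= ty < BOARD_SIZE:
--             before.append(board[ty][tx])
--             tx -= dx
--             ty -= dy
--         after = []
--         tx, ty = x + dx, y + dy
--         while 0 <= tx < BOARD_SIZE and 0 <= ty < BOARD_SIZE:
--             after.append(board[ty][tx])
--             tx += dx
--             ty += dy
--         strip = before[::-1] + [stone] + after
--         c = len(before)
--         # one forward pass: length of the contiguous run of `stone` through index c
--         run = cur = 0
--         for i, v in enumerate(strip):
--             cur = cur + 1 if v == stone else 0
--             if i == c:
--                 run = cur
--             elif i > c:
--                 if cur == 0: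
--                     break
--                 run += 1
--         total += _SCORES[min(run, 5)]
--     return total
-- ===== Notes on version B (the rewrite author's own statement) =====
-- stated objective: alternative
-- what changed: Instead of two outward stone-counting walks per direction, B gathers the whole in-bounds line through (x,y) into one strip (center forced to `stone`) and measures the run through the center in a single forward pass, then maps the capped run length through a score table.
-- outside the precondition, e.g. on _line_score([[2, 2], [2, 2]], 0, 0, 1): A returns 20, B raises IndexError
import Mathlib
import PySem

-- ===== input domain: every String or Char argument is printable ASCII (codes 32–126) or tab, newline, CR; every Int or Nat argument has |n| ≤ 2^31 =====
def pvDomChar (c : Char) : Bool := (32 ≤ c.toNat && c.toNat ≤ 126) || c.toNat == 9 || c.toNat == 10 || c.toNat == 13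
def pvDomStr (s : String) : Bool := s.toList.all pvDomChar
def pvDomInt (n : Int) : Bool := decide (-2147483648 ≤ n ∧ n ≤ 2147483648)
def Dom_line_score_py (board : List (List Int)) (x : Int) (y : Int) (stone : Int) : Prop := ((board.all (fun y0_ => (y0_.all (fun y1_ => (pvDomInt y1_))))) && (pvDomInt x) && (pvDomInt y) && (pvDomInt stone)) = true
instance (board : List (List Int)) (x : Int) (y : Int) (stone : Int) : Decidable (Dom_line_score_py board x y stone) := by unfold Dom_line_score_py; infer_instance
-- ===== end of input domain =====

-- B gathers each whole in-bounds line into a strip and measures the run through the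
-- center in one forward pass, instead of A's two outward counting walks (objective: alternative).

-- ===== PORT A =====
-- board[ty][tx]; returns 0 where Python would raise IndexError (such inputs are outside Pre_)
def pvCellA (board : List (List Int)) (tx ty : Int) : Int :=
  (PySem.List.pyGet? ((PySem.List.pyGet? board ty).getD []) tx).getD 0

-- the `while True` walk of count_dir; fuel 16 exceeds the ≤ 15 steps possible inside the 15×15 box
def pvCountDir (board : List (List Int)) (stone dx dy : Int) : Nat → Int → Int → Int → Int
  | 0, _, _, cnt => cnt
  | fuel+1, tx, ty, cnt =>
    if 0 ≤ tx ∧ tx < 15 ∧ 0 ≤ ty ∧ ty < 15 ∧ pvCellA board tx ty = stone then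
      pvCountDir board stone dx dy fuel (tx + dx) (ty + dy) (cnt + 1)
    else cnt

def line_score_py (board : List (List Int)) (x : Int) (y : Int) (stone : Int) : Int :=
  ([(1, 0), (0, 1), (1, 1), (1, -1)] : List (Int × Int)).foldl
    (fun score d =>
      let c := 1 + pvCountDir board stone d.1 d.2 16 (x + d.1) (y + d.2) 0
                 + pvCountDir board stone (-d.1) (-d.2) 16 (x - d.1) (y - d.2) 0
      if c ≥ 5 then score + 100000
      else if c = 4 then score + 5000
      else if c = 3 then score + 500
      else if c = 2 then score + 50
      else score + 5)
    0

-- ===== PORT B =====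
-- board[ty][tx]; returns 0 where Python would raise IndexError (such inputs are outside Pre_)
def pvCellB (board : List (List Int)) (tx ty : Int) : Int :=
  (PySem.List.pyGet? ((PySem.List.pyGet? board ty).getD []) tx).getD 0

-- the in-bounds gathering `while` loop of Source B; fuel 16 exceeds the ≤ 15 in-box steps
def pvGather (board : List (List Int)) (dx dy : Int) : Nat → Int → Int → List Int
  | 0, _, _ => []
  | fuel+1, tx, ty =>
    if 0 ≤ tx ∧ tx < 15 ∧ 0 ≤ ty ∧ ty < 15 then
      pvCellB board tx ty :: pvGather board dx dy fuel (tx + dx) (ty + dy)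
    else []

-- the single `for i, v in enumerate(strip)` pass of Source B, with its break
def pvScanRun (stone : Int) (c : Nat) : List Int → Nat → Int → Int → Int
  | [], _, _, run => run
  | v :: rest, i, cur, run =>
    let cur' := if v = stone then cur + 1 else 0
    if i = c then pvScanRun stone c rest (i + 1) cur' cur'
    else if c < i then
      (if cur' = 0 then run else pvScanRun stone c rest (i + 1) cur' (run + 1))
    else pvScanRun stone c rest (i + 1) cur' run

def pvScores : PySem.Dict Int Int := PySem.Dict.ofList [(1, 5), (2, 50), (3, 500), (4, 5000), (5, 100000)]

def line_score_py_alt (board : List (List Int)) (x : Int) (y : Int) (stone : Int) : Int :=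
  ([(1, 0), (0, 1), (1, 1), (1, -1)] : List (Int × Int)).foldl
    (fun total d =>
      let before := pvGather board (-d.1) (-d.2) 16 (x - d.1) (y - d.2)
      let after := pvGather board d.1 d.2 16 (x + d.1) (y + d.2)
      let strip := before.reverse ++ stone :: after
      let c := before.length
      let run := pvScanRun stone c strip 0 0 0
      -- _SCORES[min(run,5)]: the key is always present (run ≥ 1), so getD 0 is exact
      total + (PySem.Dict.get? pvScores (min run 5)).getD 0)
    0

-- ===== PRECONDITION & SPEC =====
-- Pre_ excludes boards not covering the full 15×15 area while (x,y) is near it: there Python A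
-- raises IndexError on most such inputs, and where A's walk happens to stop before a missing
-- cell A returns but B's whole-line gathering raises, so neither value is claimable.
def Pre_line_score_py (board : List (List Int)) (x : Int) (y : Int) (stone : Int) : Prop :=
  (15 ≤ board.length ∧ ∀ row ∈ board.take 15, 15 ≤ row.length)
  ∨ x < -1 ∨ 15 < x ∨ y < -1 ∨ 15 < y
instance (board : List (List Int)) (x : Int) (y : Int) (stone : Int) : Decidable (Pre_line_score_py board x y stone) := by unfold Pre_line_score_py; infer_instance

def pvWitness_line_score_py : List (List Int) × Int × Int × Int :=
  (List.replicate 15 (List.replicate 15 (0 : Int)), 7, 7, 1)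

def Spec_line_score_py (board : List (List Int)) (x : Int) (y : Int) (stone : Int) (out : Int) : Prop := out = line_score_py_alt board x y stone
instance (board : List (List Int)) (x : Int) (y : Int) (stone : Int) (out : Int) : Decidable (Spec_line_score_py board x y stone out) := by unfold Spec_line_score_py; infer_instance

-- ===== CLAIM (what is proved, stated in full; the proofs are below) =====
def Claim_equal_line_score_py : Prop := ∀ (board : List (List Int)) (x : Int) (y : Int) (stone : Int), Dom_line_score_py board x y stone → Pre_line_score_py board x y stone → Spec_line_score_py board x y stone (line_score_py board x y stone)

-- ===== LEMMAS AND PROOFS =====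

-- running-cur accumulator of the scan, as a standalone fold
def pvCurAfter (stone : Int) : List Int → Int → Int
  | [], cur => cur
  | v :: rest, cur => pvCurAfter stone rest (if v = stone then cur + 1 else 0)

def pvLeadRun (stone : Int) : List Int → Int
  | [] => 0
  | v :: rest => if v = stone then 1 + pvLeadRun stone rest else 0

theorem pvCountDir_eq_leadRun (board : List (List Int)) (stone dx dy : Int) :
    ∀ (fuel : Nat) (tx ty cnt : Int),
      pvCountDir board stone dx dy fuel tx ty cnt
        = cnt + pvLeadRun stone (pvGather board dx dy fuel tx ty) := by
  intro fuel
  induction fuel with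
  | zero => intro tx ty cnt; simp [pvCountDir, pvGather, pvLeadRun]
  | succ n ih =>
    intro tx ty cnt
    by_cases hb : 0 ≤ tx ∧ tx < 15 ∧ 0 ≤ ty ∧ ty < 15
    · by_cases hs : pvCellB board tx ty = stone
      · have : pvCellA board tx ty = stone := hs
        simp only [pvCountDir, pvGather, hb, this, and_true, if_pos,
          pvLeadRun, if_pos hs]
        rw [ih]
        ring
      · have hA : ¬ (0 ≤ tx ∧ tx < 15 ∧ 0 ≤ ty ∧ ty < 15 ∧ pvCellA board tx ty = stone) := by
          intro h; exact hs h.2.2.2.2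
        simp [pvCountDir, pvGather, if_pos hb, if_neg hA, pvLeadRun, hs]
    · have hA : ¬ (0 ≤ tx ∧ tx < 15 ∧ 0 ≤ ty ∧ ty < 15 ∧ pvCellA board tx ty = stone) := by
        intro h; exact hb ⟨h.1, h.2.1, h.2.2.1, h.2.2.2.1⟩
      simp [pvCountDir, pvGather, if_neg hb, if_neg hA, pvLeadRun]

theorem pvCurAfter_reverse (stone : Int) (L : List Int) :
    pvCurAfter stone L.reverse 0 = pvLeadRun stone L := by
  induction L with
  | nil => simp [pvCurAfter, pvLeadRun]
  | cons a t ih =>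
    have snoc : ∀ (P : List Int) (v cur : Int),
        pvCurAfter stone (P ++ [v]) cur
          = (if v = stone then pvCurAfter stone P cur + 1 else 0) := by
      intro P
      induction P with
      | nil => intro v cur; simp [pvCurAfter]
      | cons b q ihq => intro v cur; simp [pvCurAfter, ihq]
    by_cases h : a = stone
    · simp [List.reverse_cons, snoc, h, pvLeadRun, ih]
      ring
    · simp [List.reverse_cons, snoc, h, pvLeadRun]

theorem pvScanRun_prefix (stone : Int) (c : Nat) :
    ∀ (P rest : List Int) (i : Nat) (cur run : Int), i + P.length = c →
      pvScanRun stone c (P ++ rest) i cur run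
        = pvScanRun stone c rest c (pvCurAfter stone P cur) run := by
  intro P
  induction P with
  | nil => intro rest i cur run h; simp at h; simp [h, pvCurAfter]
  | cons v t ih =>
    intro rest i cur run h
    have hi : i ≠ c := by simp at h; omega
    have hi2 : ¬ c < i := by simp at h; omega
    simp only [List.cons_append, pvScanRun, if_neg hi, if_neg hi2]
    exact ih rest (i + 1) _ run (by simp at h ⊢; omega)

theorem pvScanRun_suffix (stone : Int) (c : Nat) :
    ∀ (R : List Int) (i : Nat) (cur run : Int), c < i → 0 ≤ cur →
      pvScanRun stone c R i cur run = run + pvLeadRun stone R := by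
  intro R
  induction R with
  | nil => intro i cur run h _; simp [pvScanRun, pvLeadRun]
  | cons v t ih =>
    intro i cur run h hc
    have hi : i ≠ c := by omega
    by_cases hs : v = stone
    · simp only [pvScanRun, if_neg hi, if_pos h, if_pos hs]
      rw [if_neg (show ¬(cur + 1 : Int) = 0 by omega)]
      rw [ih (i + 1) (cur + 1) (run + 1) (by omega) (by omega)]
      simp [pvLeadRun, hs]; ring
    · simp [pvScanRun, if_neg hi, h, hs, pvLeadRun]

theorem pvScanRun_center (stone : Int) (c : Nat) (R : List Int) (cur run : Int) (hc : 0 ≤ cur) :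
    pvScanRun stone c (stone :: R) c cur run
      = (cur + 1) + pvLeadRun stone R := by
  simp only [pvScanRun]
  exact pvScanRun_suffix stone c R (c + 1) (cur + 1) (cur + 1) (by omega) (by omega)

theorem pvCurAfter_nonneg (stone : Int) :
    ∀ (P : List Int) (cur : Int), 0 ≤ cur → 0 ≤ pvCurAfter stone P cur := by
  intro P
  induction P with
  | nil => intro cur h; simpa [pvCurAfter] using h
  | cons v t ih =>
    intro cur h
    by_cases hs : v = stone <;> simp only [pvCurAfter, hs, if_pos, if_neg] <;> [exact ih _ (by omega); exact ih _ (by omega)]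

theorem pvLeadRun_nonneg (stone : Int) (L : List Int) : 0 ≤ pvLeadRun stone L := by
  induction L with
  | nil => simp [pvLeadRun]
  | cons v t ih => by_cases h : v = stone <;> simp [pvLeadRun, h] <;> omega

theorem pvScore_lookup (r : Int) (h : 1 ≤ r) :
    (PySem.Dict.get? pvScores (min r 5)).getD 0
      = (if r ≥ 5 then 100000 else if r = 4 then 5000 else if r = 3 then 500
         else if r = 2 then 50 else 5 : Int) := by
  rcases lt_or_ge r 5 with h5 | h5
  · have hm : min r 5 = r := by omega
    rw [hm]
    interval_cases r <;> decide
  · have hm : min r 5 = 5 := by omega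
    rw [hm, if_pos h5]
    decide

theorem pvDir_eq (board : List (List Int)) (x y stone dx dy : Int) (total : Int) :
    (let before := pvGather board (-dx) (-dy) 16 (x - dx) (y - dy)
     let after := pvGather board dx dy 16 (x + dx) (y + dy)
     let strip := before.reverse ++ stone :: after
     let c := before.length
     let run := pvScanRun stone c strip 0 0 0
     total + (PySem.Dict.get? pvScores (min run 5)).getD 0)
    = (let c := 1 + pvCountDir board stone dx dy 16 (x + dx) (y + dy) 0
                 + pvCountDir board stone (-dx) (-dy) 16 (x - dx) (y - dy) 0
       if c ≥ 5 then total + 100000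
       else if c = 4 then total + 5000
       else if c = 3 then total + 500
       else if c = 2 then total + 50
       else total + 5) := by
  simp only []
  set L := pvGather board (-dx) (-dy) 16 (x - dx) (y - dy) with hL
  set R := pvGather board dx dy 16 (x + dx) (y + dy) with hR
  have hrun : pvScanRun stone L.length (L.reverse ++ stone :: R) 0 0 0
      = (pvLeadRun stone L + 1) + pvLeadRun stone R := by
    rw [pvScanRun_prefix stone L.length L.reverse (stone :: R) 0 0 0 (by simp),
      pvScanRun_center _ _ _ _ _ (pvCurAfter_nonneg stone _ 0 le_rfl), pvCurAfter_reverse]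
  rw [hrun, pvCountDir_eq_leadRun, pvCountDir_eq_leadRun, ← hL, ← hR]
  have h1 : (1 : Int) ≤ (pvLeadRun stone L + 1) + pvLeadRun stone R := by
    have := pvLeadRun_nonneg stone L; have := pvLeadRun_nonneg stone R; omega
  rw [pvScore_lookup _ h1]
  have harith : (pvLeadRun stone L + 1) + pvLeadRun stone R
      = 1 + (0 + pvLeadRun stone R) + (0 + pvLeadRun stone L) := by ring
  rw [harith]
  split_ifs <;> omega

-- ===== VERDICT (by name: the statement is the Claim_ definition above) =====
theorem line_score_py_spec : Claim_equal_line_score_py := by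
  intro board x y stone _ _
  unfold Spec_line_score_py line_score_py line_score_py_alt
  simp only [List.foldl]
  rw [pvDir_eq, pvDir_eq, pvDir_eq, pvDir_eq]
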